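-- pv_equiv track=rewrite | github.com/fahmizainal17/Streamlit_Teachings_Project | app/pages/4_Malaysian_Population_🇲🇾.py | classify_age_group
-- ===== SOURCE A (Python) =====
-- def classify_age_group(age):
--     if age == 'overall':
--         return 'Overall'
--     age_ranges = {
--         '18-24 (Gen Z)': ['15-19', '20-24'],
--         '25-40 (Millennial)': ['25-29', '30-34', '35-39'],
--         '41-56 (Gen X)': ['40-44', '45-49', '50-54', '55-59'],
--         '57+ (Baby Boomers)': ['60-64', '65-69', '70+', '70-74', '75-79', '80+', '80-84', '85+']
--     }
--     for group, ranges in age_ranges.items():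
--         if age in ranges:
--             return group
--     return 'Unknown'
-- ===== SOURCE B (Python) =====
-- # Flat sorted table + positional arithmetic: find the range's index in one flat
-- # list, then derive the group from the index via cumulative boundaries.
-- _FLAT = ['15-19', '20-24', '25-29', '30-34', '35-39', '40-44', '45-49', '50-54',
--          '55-59', '60-64', '65-69', '70+', '70-74', '75-79', '80+', '80-84', '85+']
-- _GROUPS = ['18-24 (Gen Z)', '25-40 (Millennial)', '41-56 (Gen X)', '57+ (Baby Boomers)']
-- _BOUNDS = [2, 5, 9]  # first flat index of each group after the first
--
-- def classify_age_group(age):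
--     if age == 'overall':
--         return 'Overall'
--     if age not in _FLAT:
--         return 'Unknown'
--     i = _FLAT.index(age)
--     g = sum(i >= b for b in _BOUNDS)
--     return _GROUPS[g]
-- ===== Notes on version B (the rewrite author's own statement) =====
-- stated objective: alternative
-- what changed: Replaces the per-group membership scan over a grouped dict with a single flat sorted range list: one positional index lookup, then the group is computed arithmetically from the index against cumulative group boundaries.
import Mathlib
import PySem

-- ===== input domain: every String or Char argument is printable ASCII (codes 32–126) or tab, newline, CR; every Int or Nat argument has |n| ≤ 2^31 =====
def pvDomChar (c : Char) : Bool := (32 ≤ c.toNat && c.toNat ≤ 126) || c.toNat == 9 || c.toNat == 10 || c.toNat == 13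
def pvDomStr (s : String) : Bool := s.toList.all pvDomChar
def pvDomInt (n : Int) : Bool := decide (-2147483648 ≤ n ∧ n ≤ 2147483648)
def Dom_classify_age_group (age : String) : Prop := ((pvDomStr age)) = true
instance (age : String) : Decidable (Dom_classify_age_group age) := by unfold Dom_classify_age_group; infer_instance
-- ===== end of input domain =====

set_option maxRecDepth 10000


-- B replaces A's per-group membership scan with one flat sorted range list:
-- a single positional index lookup plus boundary arithmetic picks the group (alternative).

-- ===== PORT A =====
-- the grouped dict, as A writes it
def pvAgeRanges : List (String × List String) :=
  [("18-24 (Gen Z)", ["15-19", "20-24"]),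
   ("25-40 (Millennial)", ["25-29", "30-34", "35-39"]),
   ("41-56 (Gen X)", ["40-44", "45-49", "50-54", "55-59"]),
   ("57+ (Baby Boomers)", ["60-64", "65-69", "70+", "70-74", "75-79", "80+", "80-84", "85+"])]

-- 'for group, ranges in age_ranges.items(): if age in ranges: return group'
def pvGroupLoop (age : String) : List (String × List String) → String
  | [] => "Unknown"
  | (group, ranges) :: rest =>
      if ranges.contains age then group else pvGroupLoop age rest

def classify_age_group (age : String) : String :=
  if age = "overall" then "Overall"
  else pvGroupLoop age pvAgeRanges

-- ===== PORT B =====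
def pvFlat : List String :=
  ["15-19", "20-24", "25-29", "30-34", "35-39", "40-44", "45-49", "50-54",
   "55-59", "60-64", "65-69", "70+", "70-74", "75-79", "80+", "80-84", "85+"]

def pvGroups : List String :=
  ["18-24 (Gen Z)", "25-40 (Millennial)", "41-56 (Gen X)", "57+ (Baby Boomers)"]

def pvBounds : List Nat := [2, 5, 9]

def classify_age_group_alt (age : String) : String :=
  if age = "overall" then "Overall"
  else
    match PySem.List.index? pvFlat age with   -- 'age not in _FLAT' / '_FLAT.index(age)'
    | none => "Unknown"
    | some i =>
        let g := pvBounds.foldl (fun s b => s + (if b ≤ i then 1 else 0)) 0  -- sum(i >= b …)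
        -- _GROUPS[g]: g ≤ 3 < len(_GROUPS), so the index is always in range
        match PySem.List.pyGet? pvGroups (g : Int) with
        | some grp => grp
        | none => "Unknown"

-- ===== PRECONDITION & SPEC =====
def Spec_classify_age_group (age : String) (out : String) : Prop := out = classify_age_group_alt age
instance (age : String) (out : String) : Decidable (Spec_classify_age_group age out) := by unfold Spec_classify_age_group; infer_instance

-- ===== CLAIM (what is proved, stated in full; the proofs are below) =====
def Claim_equal_classify_age_group : Prop := ∀ (age : String), Dom_classify_age_group age → Spec_classify_age_group age (classify_age_group age)

-- ===== LEMMAS AND PROOFS =====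
theorem pv_agree (age : String) : classify_age_group age = classify_age_group_alt age := by
  by_cases hm : age ∈ pvFlat
  · simp only [pvFlat, List.mem_cons, List.not_mem_nil, or_false] at hm
    rcases hm with h | h | h | h | h | h | h | h | h | h | h | h | h | h | h | h | h <;>
      subst h <;> decide
  · have hne : PySem.List.index? pvFlat age = none :=
      (PySem.List.index?_eq_none_iff pvFlat age).mpr hm
    simp only [pvFlat, List.mem_cons, List.not_mem_nil, or_false, not_or] at hm
    obtain ⟨n1, n2, n3, n4, n5, n6, n7, n8, n9, n10, n11, n12, n13, n14, n15, n16, n17⟩ := hm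
    unfold classify_age_group classify_age_group_alt pvAgeRanges
    rw [hne]
    by_cases h0 : age = "overall" <;>
      simp [h0, pvGroupLoop, n1, n2, n3, n4, n5, n6, n7, n8, n9, n10, n11, n12, n13, n14, n15, n16, n17]

-- ===== VERDICT (by name: the statement is the Claim_ definition above) =====
theorem classify_age_group_spec : Claim_equal_classify_age_group := by
  intro age _
  exact pv_agree age
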